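-- pv_equiv track=rewrite | github.com/1r0nw1ll/quantum-arithmetic-research | qa_alphageometry_ptolemy/qa_fibonacci_hypergraph_cert_v1/qa_fibonacci_hypergraph_cert_validate.py | compute_sliding_window
-- ===== SOURCE A (Python) =====
-- def qa_mod(x, m):
--     """A1: result in {1,...,m}, never 0."""
--     return ((int(x) - 1) % m) + 1
--
-- def qa_step(b, e, m):
--     """T: (b,e) -> (e, (b+e) mod m), A1-adjusted."""
--     return (e, qa_mod(b + e, m))
--
-- def qa_hyperedge(b, e, m):
--     """Length-4 Fibonacci window hyperedge (b, e, d, a) for state (b,e).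
--
--     A2: d = b+e, a = b+2e derived (never assigned independently).
--     """
--     d = b + e
--     a = b + 2 * e
--     return (b, e, qa_mod(d, m), qa_mod(a, m))
--
-- def t_shift_hyperedge(h, m):
--     """Sliding window shift: (F0, F1, F2, F3) -> (F1, F2, F3, (F2+F3) mod m)."""
--     _f0, f1, f2, f3 = h
--     f4 = qa_mod(f2 + f3, m)
--     return (f1, f2, f3, f4)
--
-- def enumerate_state_space(m):
--     return [(b, e) for b in range(1, m + 1) for e in range(1, m + 1)]
--
-- def compute_sliding_window(m):
--     """Return (checked, matched) over all of S_m."""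
--     checked = 0
--     matched = 0
--     for b, e in enumerate_state_space(m):
--         checked += 1
--         h = qa_hyperedge(b, e, m)
--         predicted = t_shift_hyperedge(h, m)
--         actual = qa_hyperedge(*qa_step(b, e, m), m)
--         if predicted == actual:
--             matched += 1
--     return checked, matched
-- ===== SOURCE B (Python) =====
-- def compute_sliding_window(m):
--     """Return (checked, matched) over all of S_m.
--
--     The shift identity holds for every state (all quantities agree mod m),
--     so both counts equal the number of states: m*m when m >= 1, else 0.
--     """
--     n = m if m > 0 else 0
--     return (n * n, n * n)
-- ===== Notes on version B (the rewrite author's own statement) =====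
-- stated objective: faster
-- what changed: Replaced the O(m^2) enumeration of all (b,e) states by the closed form (n*n, n*n) with n = max(m,0), justified by a proof that the sliding-window shift identity holds for every state.
import Mathlib
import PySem

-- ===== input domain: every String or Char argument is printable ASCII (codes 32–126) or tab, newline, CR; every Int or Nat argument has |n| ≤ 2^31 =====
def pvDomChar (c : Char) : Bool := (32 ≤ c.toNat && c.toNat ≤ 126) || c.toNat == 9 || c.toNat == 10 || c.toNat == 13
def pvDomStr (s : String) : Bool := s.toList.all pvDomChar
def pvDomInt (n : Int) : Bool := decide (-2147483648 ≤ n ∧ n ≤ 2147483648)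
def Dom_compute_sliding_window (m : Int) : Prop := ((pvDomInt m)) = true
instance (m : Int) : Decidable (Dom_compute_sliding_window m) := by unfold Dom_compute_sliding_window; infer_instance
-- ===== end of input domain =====

-- B replaces A's O(m^2) enumeration of all (b,e) states by the closed form
-- (n*n, n*n) with n = max(m,0): the shift identity is proved to hold for every state.

-- ===== PORT A =====
def qa_mod (x m : Int) : Int := PySem.Int.mod (x - 1) m + 1

def qa_step (b e m : Int) : Int × Int := (e, qa_mod (b + e) m)

def qa_hyperedge (b e m : Int) : Int × Int × Int × Int :=
  let d := b + e
  let a := b + 2 * e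
  (b, e, qa_mod d m, qa_mod a m)

def t_shift_hyperedge (h : Int × Int × Int × Int) (m : Int) : Int × Int × Int × Int :=
  let f1 := h.2.1
  let f2 := h.2.2.1
  let f3 := h.2.2.2
  let f4 := qa_mod (f2 + f3) m
  (f1, f2, f3, f4)

def enumerate_state_space (m : Int) : List (Int × Int) :=
  (PySem.List.pyRange 1 (m + 1) 1).flatMap
    (fun b => (PySem.List.pyRange 1 (m + 1) 1).map (fun e => (b, e)))

def compute_sliding_window (m : Int) : Int × Int :=
  (enumerate_state_space m).foldl
    (fun (acc : Int × Int) (p : Int × Int) =>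
      let checked := acc.1 + 1
      let h := qa_hyperedge p.1 p.2 m
      let predicted := t_shift_hyperedge h m
      let s := qa_step p.1 p.2 m
      let actual := qa_hyperedge s.1 s.2 m
      (checked, if predicted = actual then acc.2 + 1 else acc.2))
    (0, 0)

-- ===== PORT B =====
def compute_sliding_window_alt (m : Int) : Int × Int :=
  let n := if m > 0 then m else 0
  (n * n, n * n)

-- ===== PRECONDITION & SPEC =====
def Spec_compute_sliding_window (m : Int) (out : Int × Int) : Prop := out = compute_sliding_window_alt m
instance (m : Int) (out : Int × Int) : Decidable (Spec_compute_sliding_window m out) := by unfold Spec_compute_sliding_window; infer_instance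

-- ===== CLAIM (what is proved, stated in full; the proofs are below) =====
def Claim_equal_compute_sliding_window : Prop := ∀ (m : Int), Dom_compute_sliding_window m → Spec_compute_sliding_window m (compute_sliding_window m)

-- ===== LEMMAS AND PROOFS =====

-- For a positive modulus, Python's % is Lean's emod.
theorem qa_mod_emod (x m : Int) (hm : 0 < m) : qa_mod x m = (x - 1) % m + 1 := by
  simp [qa_mod, PySem.Int.mod_eq_emod_of_pos hm]

-- qa_mod only depends on its argument modulo m (shifted by 1).
theorem qa_mod_congr (x y m : Int) (hm : 0 < m)
    (h : (x - 1) % m = (y - 1) % m) : qa_mod x m = qa_mod y m := by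
  rw [qa_mod_emod x m hm, qa_mod_emod y m hm, h]

-- Absorb a qa_mod occurring linearly inside a sum under % m.
theorem emod_add_mul_qa_mod (s k x m : Int) (hm : 0 < m) :
    (s + k * qa_mod x m) % m = (s + k * x) % m := by
  have hq : (x - 1) % m = (x - 1) - m * ((x - 1) / m) := by rw [Int.emod_def]
  rw [qa_mod_emod x m hm, hq]
  have hr : s + k * ((x - 1) - m * ((x - 1) / m) + 1)
      = (s + k * x) + m * (-(k * ((x - 1) / m))) := by ring
  rw [hr, Int.add_mul_emod_self_left]

-- The sliding-window shift identity holds for every state (b, e).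
theorem shift_identity (b e m : Int) (hm : 0 < m) :
    t_shift_hyperedge (qa_hyperedge b e m) m
      = qa_hyperedge (qa_step b e m).1 (qa_step b e m).2 m := by
  simp only [qa_hyperedge, qa_step, t_shift_hyperedge, Prod.mk.injEq]
  refine ⟨by trivial, by trivial, ?_, ?_⟩
  · apply qa_mod_congr _ _ _ hm
    calc (b + 2 * e - 1) % m
        = (e - 1 + 1 * (b + e)) % m := by ring_nf
      _ = (e - 1 + 1 * qa_mod (b + e) m) % m := (emod_add_mul_qa_mod (e - 1) 1 (b + e) m hm).symm
      _ = (e + qa_mod (b + e) m - 1) % m := by ring_nf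
  · apply qa_mod_congr _ _ _ hm
    calc (qa_mod (b + e) m + qa_mod (b + 2 * e) m - 1) % m
        = (qa_mod (b + e) m - 1 + 1 * qa_mod (b + 2 * e) m) % m := by ring_nf
      _ = (qa_mod (b + e) m - 1 + 1 * (b + 2 * e)) % m := emod_add_mul_qa_mod _ 1 _ m hm
      _ = (b + 2 * e - 1 + 1 * qa_mod (b + e) m) % m := by ring_nf
      _ = (b + 2 * e - 1 + 1 * (b + e)) % m := emod_add_mul_qa_mod _ 1 _ m hm
      _ = (e - 1 + 2 * (b + e)) % m := by ring_nf
      _ = (e - 1 + 2 * qa_mod (b + e) m) % m := (emod_add_mul_qa_mod (e - 1) 2 (b + e) m hm).symm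
      _ = (e + 2 * qa_mod (b + e) m - 1) % m := by ring_nf

-- A's fold over a list of all-matching states just counts the list twice.
theorem foldl_all_match (m : Int) (hm : 0 < m) (ps : List (Int × Int)) (c t : Int) :
    ps.foldl
      (fun (acc : Int × Int) (p : Int × Int) =>
        let checked := acc.1 + 1
        let h := qa_hyperedge p.1 p.2 m
        let predicted := t_shift_hyperedge h m
        let s := qa_step p.1 p.2 m
        let actual := qa_hyperedge s.1 s.2 m
        (checked, if predicted = actual then acc.2 + 1 else acc.2))
      (c, t) = (c + ps.length, t + ps.length) := by
  induction ps generalizing c t with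
  | nil => simp
  | cons p ps ih =>
    simp only [List.foldl_cons, List.length_cons]
    rw [if_pos (shift_identity p.1 p.2 m hm), ih]
    simp only [Prod.mk.injEq]
    refine ⟨?_, ?_⟩ <;> (push_cast; ring)

theorem length_enumerate (m : Int) (hm : 0 < m) :
    ((enumerate_state_space m).length : Int) = m * m := by
  unfold enumerate_state_space
  rw [List.length_flatMap]
  have hrepl := List.eq_replicate_of_mem
    (l := (PySem.List.pyRange 1 (m + 1) 1).map
      (fun b => ((PySem.List.pyRange 1 (m + 1) 1).map (fun e => (b, e))).length))
    (a := m.toNat)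
    (by
      intro x hx
      rcases List.mem_map.mp hx with ⟨b, _, rfl⟩
      rw [List.length_map, PySem.List.length_pyRange_one]
      omega)
  rw [hrepl, List.sum_replicate, smul_eq_mul, List.length_map,
    PySem.List.length_pyRange_one]
  have e1 : m + 1 - 1 = m := by ring
  rw [e1, Nat.cast_mul]
  simp only [Int.toNat_of_nonneg hm.le]

-- ===== VERDICT (by name: the statement is the Claim_ definition above) =====
theorem compute_sliding_window_spec : Claim_equal_compute_sliding_window := by
  intro m _
  unfold Spec_compute_sliding_window compute_sliding_window compute_sliding_window_alt
  by_cases hm : 0 < m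
  · rw [foldl_all_match m hm, length_enumerate m hm]
    simp [hm]
  · have hnil : enumerate_state_space m = [] := by
      unfold enumerate_state_space
      rw [PySem.List.pyRange_one_eq_nil (by omega)]
      rfl
    rw [hnil]
    simp [hm]
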